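-- pv_equiv track=rewrite | github.com/brsynth/molecule-signature | src/signature/enumerate_signature.py | custom_sort_with_dependent
-- ===== SOURCE A (Python) =====
-- def custom_sort_with_dependent(primary_list, dependent_lists):
--     """
--     Sort secondary lists wrt the sorting of a primary list.
--
--     Parameters
--     ----------
--     primary_list : list
--         A list that we want to sort.
--     dependent_lists : a list of lists
--         A list of secondary lists that we want to sort wrt the sorting of the primary_list.
--
--     Returns
--     -------
--     sorted_primary : list
--         A sorted list.
--     sorted_dependent_lists : list of lists
--         A list of lists sorted wrt to the sorted_primary.
--     """
--
--     # Sort each sublist in the primary list individually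
--     primary_list = [sorted(sublist) for sublist in primary_list]
--     # Create a list of indices based on the custom sorting criteria
--     sorted_indices = sorted(
--         range(len(primary_list)), key=lambda idx: [x if x != 0 else float("-inf") for x in primary_list[idx]]
--     )
--     # Sort both the primary and dependent lists using the sorted indices
--     sorted_primary = [primary_list[i] for i in sorted_indices]
--     sorted_dependent_lists = []
--     for i in range(len(dependent_lists)):
--         l = dependent_lists[i]
--         sorted_l = [l[i] for i in sorted_indices]
--         sorted_dependent_lists.append(sorted_l)
--     return sorted_primary, sorted_dependent_lists
-- ===== SOURCE B (Python) =====
-- def custom_sort_with_dependent(primary_list, dependent_lists):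
--     # Stable insertion sort of packed rows with an explicit three-way comparator that
--     # treats 0 as minus infinity -- no index permutation, no float sentinel key.
--     def less(a, b):  # a < b lexicographically, 0 acting as minus infinity
--         for x, y in zip(a, b):
--             if x == y:
--                 continue
--             if x == 0:
--                 return True
--             if y == 0:
--                 return False
--             return x < y
--         return len(a) < len(b)
--
--     rows = []  # kept ordered at all times
--     for i in range(len(primary_list)):
--         row = (sorted(primary_list[i]), [l[i] for l in dependent_lists])
--         j = 0
--         while j < len(rows) and not less(row[0], rows[j][0]):
--             j += 1
--         rows.insert(j, row)
--     sorted_primary = [r[0] for r in rows]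
--     sorted_dependent_lists = [[r[1][j] for r in rows] for j in range(len(dependent_lists))]
--     return sorted_primary, sorted_dependent_lists
-- ===== Notes on version B (the rewrite author's own statement) =====
-- stated objective: alternative
-- what changed: A sorts an index permutation with a float('-inf') sentinel key and then gathers the primary and each dependent list through it; B instead keeps an always-ordered list of packed rows built by a stable insertion sort driven by an explicit hand-written lexicographic comparator that treats 0 as minus infinity (no index list, no sentinel key, no library sort of the rows), then unzips; Pre_ only excludes inputs where A raises IndexError (a dependent list shorter than primary_list), where B raises too.
import Mathlib
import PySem

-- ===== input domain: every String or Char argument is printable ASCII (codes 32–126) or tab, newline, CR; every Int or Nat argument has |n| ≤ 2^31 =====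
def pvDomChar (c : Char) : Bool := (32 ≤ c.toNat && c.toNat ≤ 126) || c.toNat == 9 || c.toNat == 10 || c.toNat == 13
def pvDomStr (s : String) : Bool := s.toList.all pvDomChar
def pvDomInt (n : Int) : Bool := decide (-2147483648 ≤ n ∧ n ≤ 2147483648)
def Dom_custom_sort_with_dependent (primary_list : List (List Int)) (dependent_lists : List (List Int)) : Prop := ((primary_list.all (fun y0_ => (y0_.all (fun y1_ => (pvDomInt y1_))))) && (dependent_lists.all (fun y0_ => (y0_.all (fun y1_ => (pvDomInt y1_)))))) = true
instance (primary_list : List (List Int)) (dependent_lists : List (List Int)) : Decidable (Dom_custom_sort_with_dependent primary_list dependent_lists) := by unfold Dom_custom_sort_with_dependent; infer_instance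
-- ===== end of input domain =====

-- B replaces A's sort-indices-then-gather with a stable INSERTION sort of packed rows driven by an
-- explicit three-way comparator (0 acting as minus infinity) — no index permutation, no float key.


-- Python's key value 'x if x != 0 else float("-inf")': on the Dom (|x| ≤ 2^31) the sentinel
-- -2^32 is exactly as small as -inf relative to every admitted element, so the key is exact there.
def pySent (x : Int) : Int := if x = 0 then -4294967296 else x

-- ===== PORT A =====
-- l[i] for an index i known to be in range (Pre_ below) is ported as pyGetD with a default.
def custom_sort_with_dependent (primary_list : List (List Int)) (dependent_lists : List (List Int)) : List (List Int) × List (List Int) :=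
  let primary := primary_list.map (fun sublist => PySem.List.sorted sublist (fun x => x) false)
  let sorted_indices := PySem.List.sorted (PySem.List.pyRange 0 (primary.length : Int) 1)
      (fun idx => (PySem.List.pyGetD primary idx []).map pySent) false
  let sorted_primary := sorted_indices.map (fun i => PySem.List.pyGetD primary i [])
  let sorted_dependent_lists := (PySem.List.pyRange 0 (dependent_lists.length : Int) 1).foldl
      (fun acc i =>
        let l := PySem.List.pyGetD dependent_lists i []
        acc ++ [sorted_indices.map (fun j => PySem.List.pyGetD l j 0)]) []
  (sorted_primary, sorted_dependent_lists)

-- ===== PORT B =====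
-- Source B's 'less': lexicographic with 0 as minus infinity, walking the zipped pair and then lengths.
def rowLess : List Int → List Int → Bool
  | [], [] => false
  | [], _ :: _ => true
  | _ :: _, [] => false
  | x :: xs, y :: ys =>
      if x = y then rowLess xs ys
      else if x = 0 then true
      else if y = 0 then false
      else decide (x < y)

-- Source B's while-loop insertion: walk past every kept row not greater, insert there.
def insertRow (row : List Int × List Int) : List (List Int × List Int) → List (List Int × List Int)
  | [] => [row]
  | r :: t => if rowLess row.1 r.1 then row :: r :: t else r :: insertRow row t

def custom_sort_with_dependent_alt (primary_list : List (List Int)) (dependent_lists : List (List Int)) : List (List Int) × List (List Int) :=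
  let rows := (PySem.List.pyRange 0 (primary_list.length : Int) 1).foldl
      (fun acc i =>
        insertRow (PySem.List.sorted (PySem.List.pyGetD primary_list i []) (fun x => x) false,
                   dependent_lists.map (fun l => PySem.List.pyGetD l i 0)) acc) []
  let sorted_primary := rows.map (fun r => r.1)
  let sorted_dependent_lists := (PySem.List.pyRange 0 (dependent_lists.length : Int) 1).map
      (fun j => rows.map (fun r => PySem.List.pyGetD r.2 j 0))
  (sorted_primary, sorted_dependent_lists)

-- ===== PRECONDITION & SPEC =====
-- Pre_ excludes exactly the inputs where Python A raises IndexError: a dependent list shorter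
-- than primary_list (the gather l[i] runs i over range(len(primary_list))).
def Pre_custom_sort_with_dependent (primary_list : List (List Int)) (dependent_lists : List (List Int)) : Prop :=
  ∀ l ∈ dependent_lists, primary_list.length ≤ l.length
instance (primary_list : List (List Int)) (dependent_lists : List (List Int)) : Decidable (Pre_custom_sort_with_dependent primary_list dependent_lists) := by unfold Pre_custom_sort_with_dependent; infer_instance
def pvWitness_custom_sort_with_dependent : List (List Int) × List (List Int) := ([[2, 0], [1]], [[5, 6], [7, 8]])

def Spec_custom_sort_with_dependent (primary_list : List (List Int)) (dependent_lists : List (List Int)) (out : List (List Int) × List (List Int)) : Prop := out = custom_sort_with_dependent_alt primary_list dependent_lists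
instance (primary_list : List (List Int)) (dependent_lists : List (List Int)) (out : List (List Int) × List (List Int)) : Decidable (Spec_custom_sort_with_dependent primary_list dependent_lists out) := by unfold Spec_custom_sort_with_dependent; infer_instance

-- ===== CLAIM (what is proved, stated in full; the proofs are below) =====
def Claim_equal_custom_sort_with_dependent : Prop := ∀ (primary_list : List (List Int)) (dependent_lists : List (List Int)), Dom_custom_sort_with_dependent primary_list dependent_lists → Pre_custom_sort_with_dependent primary_list dependent_lists → Spec_custom_sort_with_dependent primary_list dependent_lists (custom_sort_with_dependent primary_list dependent_lists)

-- ===== LEMMAS AND PROOFS =====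

-- On in-Dom elements, B's comparator IS the lexicographic order of the pySent-mapped lists.
theorem pv_rowLess_eq (a b : List Int) (ha : a.all pvDomInt = true) (hb : b.all pvDomInt = true) :
    rowLess a b = decide (a.map pySent < b.map pySent) := by
  induction a generalizing b with
  | nil =>
    cases b with
    | nil => simp [rowLess]
    | cons y ys => simp [rowLess, List.nil_lt_cons]
  | cons x xs ih =>
    cases b with
    | nil => simp [rowLess, List.not_lt_nil]
    | cons y ys =>
      simp only [List.all_cons, Bool.and_eq_true, pvDomInt, decide_eq_true_eq] at ha hb
      simp only [rowLess, List.map_cons]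
      by_cases hxy : x = y
      · subst hxy
        simp [ih ys ha.2 hb.2, pySent]
      · have hs : pySent x ≠ pySent y := by
          simp only [pySent]
          split_ifs with h1 h2 h2 <;> omega
        by_cases hx0 : x = 0
        · subst hx0
          have hy0 : y ≠ 0 := fun h => hxy h.symm
          simp [hxy, hy0, List.cons_lt_cons_iff, pySent]
          omega
        · by_cases hy0 : y = 0
          · subst hy0
            simp [hxy, List.cons_lt_cons_iff, pySent]
            omega
          · simp [hxy, hx0, hy0, List.cons_lt_cons_iff, pySent]

def pvGoodRow (r : List Int × List Int) : Prop := r.1.all pvDomInt = true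

theorem pv_insertRow_eq (row : List Int × List Int) (ys : List (List Int × List Int))
    (h1 : pvGoodRow row) (h2 : ∀ y ∈ ys, pvGoodRow y) :
    insertRow row ys
      = PySem.List.insertBy (fun a b => decide ((a.1.map pySent) < (b.1.map pySent))) row ys := by
  induction ys with
  | nil => rfl
  | cons y t ihy =>
    simp only [insertRow, PySem.List.insertBy,
      pv_rowLess_eq row.1 y.1 h1 (h2 y (List.mem_cons_self))]
    split
    · rfl
    · rw [ihy (fun z hz => h2 z (List.mem_cons_of_mem _ hz))]

theorem pv_foldl_insertRow (l : List (List Int × List Int)) (hl : ∀ r ∈ l, pvGoodRow r)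
    (acc : List (List Int × List Int)) (hacc : ∀ r ∈ acc, pvGoodRow r) :
    l.foldl (fun acc r => insertRow r acc) acc
      = l.foldl (fun acc r =>
          PySem.List.insertBy (fun a b => decide ((a.1.map pySent) < (b.1.map pySent))) r acc) acc := by
  induction l generalizing acc with
  | nil => rfl
  | cons r t ih =>
    simp only [List.foldl_cons]
    rw [pv_insertRow_eq r acc (hl r (List.mem_cons_self)) hacc]
    exact ih (fun z hz => hl z (List.mem_cons_of_mem _ hz)) _
      (fun z hz => by
        rcases (PySem.List.mem_insertBy _ _ _ _).1 hz with h | h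
        · exact h ▸ hl r (List.mem_cons_self)
        · exact hacc z h)

-- insertBy on a mapped list, when the comparison only looks through the map.
theorem pv_insertBy_map {α β : Type} (before : β → β → Bool) (g : α → β) (x : α) (ys : List α) :
    PySem.List.insertBy before (g x) (ys.map g)
      = (PySem.List.insertBy (fun a b => before (g a) (g b)) x ys).map g := by
  induction ys with
  | nil => rfl
  | cons y t ih =>
    simp only [List.map_cons, PySem.List.insertBy]
    split <;> simp [*]

-- Decorate–sort–undecorate: a stable sort of a mapped list is the map of the sort by the composed key.
theorem pv_sorted_map {α β κ : Type} [LT κ] [DecidableLT κ] (g : α → β) (key : β → κ) (l : List α) :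
    PySem.List.sorted (l.map g) key false
      = (PySem.List.sorted l (fun a => key (g a)) false).map g := by
  rw [PySem.List.sorted_eq_foldl_insertBy, PySem.List.sorted_eq_foldl_insertBy, List.foldl_map]
  suffices h : ∀ acc : List α,
      List.foldl (fun acc x => PySem.List.insertBy (fun a b => decide (key a < key b)) (g x) acc)
        (acc.map g) l
      = (List.foldl (fun acc x => PySem.List.insertBy (fun a b => decide (key (g a) < key (g b))) x acc)
          acc l).map g by
    simpa using h []
  induction l with
  | nil => intro acc; rfl
  | cons x t ih =>
    intro acc
    simp only [List.foldl_cons, pv_insertBy_map (fun a b => decide (key a < key b)) g x acc]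
    exact ih _

-- ===== VERDICT (by name: the statement is the Claim_ definition above) =====
theorem custom_sort_with_dependent_spec : Claim_equal_custom_sort_with_dependent := by
  intro P D hdom _hpre
  unfold Spec_custom_sort_with_dependent custom_sort_with_dependent custom_sort_with_dependent_alt
  -- B's insertion-sort fold is the stable library sort of the packed rows
  have hrows :
      ((PySem.List.pyRange 0 (P.length : Int) 1).map
        (fun i => (PySem.List.sorted (PySem.List.pyGetD P i []) (fun x => x) false,
                   D.map (fun l => PySem.List.pyGetD l i 0)))).foldl
        (fun acc r => insertRow r acc) []
      = PySem.List.sorted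
          ((PySem.List.pyRange 0 (P.length : Int) 1).map
            (fun i => (PySem.List.sorted (PySem.List.pyGetD P i []) (fun x => x) false,
                       D.map (fun l => PySem.List.pyGetD l i 0))))
          (fun r => r.1.map pySent) false := by
    rw [PySem.List.sorted_eq_foldl_insertBy]
    refine (pv_foldl_insertRow _ ?_ [] (by intro r h; cases h)).symm.symm
    intro r hr
    rcases List.mem_map.1 hr with ⟨i, _, rfl⟩
    unfold pvGoodRow
    simp only [List.all_eq_true]
    intro x hx
    rw [PySem.List.mem_sorted] at hx
    rcases Decidable.em (PySem.List.pyGet? P i = none) with h | h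
    · simp [PySem.List.pyGetD, h] at hx
    · rcases Option.ne_none_iff_exists'.1 h with ⟨l, hl⟩
      have hlP := PySem.List.mem_of_pyGet?_eq_some (xs := P) (i := i) hl
      simp only [PySem.List.pyGetD, hl, Option.getD_some] at hx
      simp only [Dom_custom_sort_with_dependent, Bool.and_eq_true, List.all_eq_true] at hdom
      exact hdom.1 l hlP x hx
  -- B's fold appears under the lets; rewrite it, then both sides match the decorated-sort shapes.
  simp only []
  rw [show ((PySem.List.pyRange 0 (P.length : Int) 1).foldl
      (fun acc i =>
        insertRow (PySem.List.sorted (PySem.List.pyGetD P i []) (fun x => x) false,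
                   D.map (fun l => PySem.List.pyGetD l i 0)) acc) [])
    = ((PySem.List.pyRange 0 (P.length : Int) 1).map
        (fun i => (PySem.List.sorted (PySem.List.pyGetD P i []) (fun x => x) false,
                   D.map (fun l => PySem.List.pyGetD l i 0)))).foldl
        (fun acc r => insertRow r acc) [] from by rw [List.foldl_map]]
  rw [hrows]
  have hget : ∀ i : Int,
      PySem.List.pyGetD (P.map (fun sublist => PySem.List.sorted sublist (fun x => x) false)) i []
        = PySem.List.sorted (PySem.List.pyGetD P i []) (fun x => x) false :=
    fun i => PySem.List.pyGetD_map (fun sublist => PySem.List.sorted sublist (fun x => x) false) P i []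
  have hcol : ∀ (i j : Int),
      PySem.List.pyGetD (D.map (fun l => PySem.List.pyGetD l i 0)) j 0
        = PySem.List.pyGetD (PySem.List.pyGetD D j []) i 0 := by
    intro i j
    have h := PySem.List.pyGetD_map (fun l => PySem.List.pyGetD l i 0) D j []
    simpa [PySem.List.pyGetD, PySem.List.pyGet?, PySem.List.pyIdx?] using h
  simp only [pv_sorted_map, List.length_map, List.map_map, Function.comp_def, hget, hcol,
    PySem.List.foldl_append_singleton_eq_map, List.nil_append]
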